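-- pv_equiv track=rewrite | github.com/mrkylesmith/usher | scripts/recombination/run.py | get_partitions
-- ===== SOURCE A (Python) =====
-- def get_partitions(long_branches, instances):
--     partitions = []
--     per_instance = long_branches // instances
--     k = 0
--     for i in range(1, instances+1):
--         # Last partition gets extra
--         if i == instances:
--             partitions.append((k, long_branches))
--             break
--         partitions.append((k, k + per_instance))
--         k += per_instance + 1
--     return partitions
-- ===== SOURCE B (Python) =====
-- def get_partitions(long_branches, instances):
--     per = long_branches // instances
--     # boundary list: the start of every partition, plus one sentinel past the end
--     cuts = [i * (per + 1) for i in range(instances)]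
--     cuts.append(long_branches + 1)
--     # each partition runs from its cut up to the next cut minus one
--     return list(zip(cuts, [c - 1 for c in cuts[1:]]))
-- ===== Notes on version B (the rewrite author's own statement) =====
-- stated objective: alternative
-- what changed: B replaces A's accumulator loop that emits (start,end) pairs with a running k by a boundary-list construction: it builds the list of partition start cuts plus a sentinel long_branches+1, then zips each cut with the next cut minus one.
import Mathlib
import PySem

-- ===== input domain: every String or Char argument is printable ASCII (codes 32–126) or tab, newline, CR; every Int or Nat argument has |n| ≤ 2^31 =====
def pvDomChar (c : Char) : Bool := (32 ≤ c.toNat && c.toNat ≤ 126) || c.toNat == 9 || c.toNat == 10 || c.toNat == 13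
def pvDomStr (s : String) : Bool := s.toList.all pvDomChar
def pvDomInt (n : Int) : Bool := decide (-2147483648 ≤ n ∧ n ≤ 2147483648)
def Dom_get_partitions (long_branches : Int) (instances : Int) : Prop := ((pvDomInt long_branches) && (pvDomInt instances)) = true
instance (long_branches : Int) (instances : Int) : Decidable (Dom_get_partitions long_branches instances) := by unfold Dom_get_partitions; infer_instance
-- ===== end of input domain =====

-- B replaces A's accumulator loop over (start,end) pairs by a boundary-list construction:
-- build the list of partition start cuts plus one sentinel, then pair each cut with the
-- next cut minus one via zip (alternative decomposition, same cost).

-- ===== PORT A =====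
-- the for-loop with 'break': recursion over the remaining range, carrying (partitions, k)
def get_partitions_loop (long_branches per_instance instances : Int) :
    List Int → List (Int × Int) → Int → List (Int × Int)
  | [], partitions, _ => partitions
  | i :: rest, partitions, k =>
      if i = instances then partitions ++ [(k, long_branches)]
      else get_partitions_loop long_branches per_instance instances rest
             (partitions ++ [(k, k + per_instance)]) (k + per_instance + 1)

def get_partitions (long_branches : Int) (instances : Int) : List (Int × Int) :=
  let per_instance := PySem.Int.floordiv long_branches instances
  get_partitions_loop long_branches per_instance instances
    (PySem.List.pyRange 1 (instances + 1) 1) [] 0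

-- ===== PORT B =====
def get_partitions_alt (long_branches : Int) (instances : Int) : List (Int × Int) :=
  let per := PySem.Int.floordiv long_branches instances
  let cuts := (PySem.List.pyRange 0 instances 1).map (fun i => i * (per + 1)) ++ [long_branches + 1]
  List.zip cuts ((PySem.List.slice cuts (some 1) none).map (fun c => c - 1))

-- ===== PRECONDITION & SPEC =====
-- instances = 0 is excluded: Python's '//' raises ZeroDivisionError there (in A and in B alike)
def Pre_get_partitions (long_branches : Int) (instances : Int) : Prop := instances ≠ 0
instance (long_branches : Int) (instances : Int) : Decidable (Pre_get_partitions long_branches instances) := by unfold Pre_get_partitions; infer_instance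
def pvWitness_get_partitions : Int × Int := (10, 3)

def Spec_get_partitions (long_branches : Int) (instances : Int) (out : List (Int × Int)) : Prop := out = get_partitions_alt long_branches instances
instance (long_branches : Int) (instances : Int) (out : List (Int × Int)) : Decidable (Spec_get_partitions long_branches instances out) := by unfold Spec_get_partitions; infer_instance

-- ===== CLAIM (what is proved, stated in full; the proofs are below) =====
def Claim_equal_get_partitions : Prop := ∀ (long_branches : Int) (instances : Int), Dom_get_partitions long_branches instances → Pre_get_partitions long_branches instances → Spec_get_partitions long_branches instances (get_partitions long_branches instances)

-- ===== LEMMAS AND PROOFS =====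

-- closed form both sides will be related to
def pvClosed (lb per inst j : Int) : Int × Int :=
  (j * (per + 1), if j = inst - 1 then lb else j * (per + 1) + per)

-- A's loop invariant: starting at index j+1 with accumulator k = j*(per+1), the loop
-- appends exactly the closed-form partitions for indices j, …, instances-1
lemma get_partitions_loop_eq (lb per inst : Int) :
    ∀ (n : Nat) (j : Int) (acc : List (Int × Int)), inst = j + n → 0 < n →
    get_partitions_loop lb per inst (PySem.List.pyRange (j + 1) (inst + 1) 1) acc (j * (per + 1)) =
      acc ++ (PySem.List.pyRange j inst 1).map (pvClosed lb per inst) := by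
  intro n
  induction n with
  | zero => omega
  | succ m ih =>
    intro j acc hj _
    rw [PySem.List.pyRange_one_cons (a := j + 1) (b := inst + 1) (by omega),
        PySem.List.pyRange_one_cons (a := j) (b := inst) (by omega)]
    by_cases hlast : j + 1 = inst
    · have hm : m = 0 := by omega
      subst hm
      simp [get_partitions_loop, hlast, pvClosed]
      intro h; exact absurd (by omega) h
    · have hm : 0 < m := by omega
      rw [get_partitions_loop]
      simp only [if_neg hlast]
      have hk : j * (per + 1) + per + 1 = (j + 1) * (per + 1) := by ring
      rw [hk, ih (j + 1) _ (by omega) hm]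
      simp [List.map, pvClosed]
      intro h; exact absurd h (by omega)

-- B's boundary list zipped with its shifted self gives the same closed-form partitions
lemma zip_cuts_eq (lb per inst : Int) :
    ∀ (n : Nat) (j : Int), inst = j + n → 0 < n →
    List.zip ((PySem.List.pyRange j inst 1).map (fun i => i * (per + 1)) ++ [lb + 1])
      ((((PySem.List.pyRange j inst 1).map (fun i => i * (per + 1)) ++ [lb + 1]).tail).map (fun c => c - 1)) =
      (PySem.List.pyRange j inst 1).map (pvClosed lb per inst) := by
  intro n
  induction n with
  | zero => omega
  | succ m ih =>
    intro j hj _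
    rw [PySem.List.pyRange_one_cons (a := j) (b := inst) (by omega)]
    by_cases hlast : j + 1 = inst
    · have hm : m = 0 := by omega
      subst hm
      rw [PySem.List.pyRange_one_eq_nil (a := j + 1) (b := inst) (by omega)]
      simp [pvClosed]
      intro h; exact absurd (by omega) h
    · have hm : 0 < m := by omega
      rw [PySem.List.pyRange_one_cons (a := j + 1) (b := inst) (by omega)]
      have h2 := ih (j + 1) (by omega) hm
      rw [PySem.List.pyRange_one_cons (a := j + 1) (b := inst) (by omega)] at h2
      simp only [List.map_cons, List.cons_append, List.tail_cons, List.zip_cons_cons] at h2 ⊢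
      rw [h2]
      simp [pvClosed]
      rw [if_neg (by omega : ¬ j = inst - 1)]
      ring

theorem get_partitions_spec : Claim_equal_get_partitions := by
  intro lb inst _ hpre
  unfold Spec_get_partitions get_partitions get_partitions_alt
  simp only [PySem.List.slice_from_one]
  by_cases hpos : 0 < inst
  · have hA := get_partitions_loop_eq lb (PySem.Int.floordiv lb inst) inst inst.toNat 0 []
      (by omega) (by omega)
    have hB := zip_cuts_eq lb (PySem.Int.floordiv lb inst) inst inst.toNat 0 (by omega) (by omega)
    simp only [zero_add, zero_mul] at hA hB
    rw [hA, List.nil_append, ← hB]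
  · rw [PySem.List.pyRange_one_eq_nil (a := 1) (b := inst + 1) (by omega),
        PySem.List.pyRange_one_eq_nil (a := 0) (b := inst) (by omega)]
    rfl
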